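-- pv_equiv track=rewrite | github.com/khash2a/FrobeniusPython | frobenius.py | Frobenius_test
-- ===== SOURCE A (Python) =====
-- def Jacobi(a,b):
--     if b<=1 or (b%2)==0: return 0;
--     res = 1
--     if a<0:
--         if b%4==3: res=-1;
--         a = -a
--     if a>=b: a=a%b;
--     while True:
--         if a==0: return 0;
--         # now 1 <=a < b, b odd, ---------------
--         while a%4 ==0: a//=4;
--         if a%4==2 :
--             b8 = b%8
--             if b8==3 or b8==5: res = -res
--             a = a//2
--         if a==1: return res
--         # now 1 < a < b, a,b odd, -------------
--         # J(a,b) -> J(b,a) --------------------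
--         if a%4==3 and b%4==3 : res = -res;
--         t=b; b=a; a=t%a;
--
-- def Frobenius_test(n):
--     '''Frobinius primality test. See details in arXiv:1807.07249 [math.NT]:
--            Evaluation of the Effectiveness of the Frobenius Primality Test.
--            Sergei Khashin.
--     '''
--     if n<2: return False;
--     if n==2 or n==3: return True;
--     if n%2==0 or n%3==0: return False;
--     # now n%2 !=0, n%3 !=0, n >= 5
--
--     #if is_square(n): return False; ---
--     x = 1<<((n.bit_length()+1)//2)
--     while True:
--         delta = x*x-n
--         if delta==0: return False
--         if delta< 0: break
--         x -= 1+delta//(2*x)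
--     # now n%2 !=0, n%3 !=0, n >= 5 and n is not a perfect square
--
--     #c = Frob_minC(n);
--     c = 0
--     if   n%4 == 3    : c=-1
--     elif n%8 == 5    : c=2
--     elif n%24==17    : c=3
--     else:
--         c = 5
--         while True:
--             jcn = Jacobi(c,n)
--             if jcn== 0: return False;
--             if jcn==-1: break;
--             c =c+2
--     # c is ready
--
--     a = 1; b=1;
--     if c<3: a=2;
--     #a1,b1 = Frob_pow(a,b,c,n,n)
--     a1=1; b1=0; a2=a; b2=b; k=n
--
--     while k>0:
--         if k % 2 == 1:                                      # z1 *= z2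
--             tb = (a1*b2 + a2*b1)%n
--             ta = (a1*a2 + b1*b2*c)%n
--             a1 = ta
--             b1 = tb
--
--         # z2 *= z2
--         ta = (a2*a2+c*b2*b2)%n
--         b2 = (2*a2*b2)%n;
--         a2 = ta
--
--         k>>=1;                                  # k /= 2
--     return (a1==a) and (b1==n-b)
-- ===== SOURCE B (Python) =====
-- def Jacobi(a,b):
--     if b<=1 or (b%2)==0: return 0;
--     res = 1
--     if a<0:
--         if b%4==3: res=-1;
--         a = -a
--     if a>=b: a=a%b;
--     while True:
--         if a==0: return 0;
--         while a%4 ==0: a//=4;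
--         if a%4==2 :
--             b8 = b%8
--             if b8==3 or b8==5: res = -res
--             a = a//2
--         if a==1: return res
--         if a%4==3 and b%4==3 : res = -res;
--         t=b; b=a; a=t%a;
--
-- def Frobenius_test(n):
--     '''Frobenius primality test; same guards as the original, but the final
--     exponentiation is done left-to-right over the bits of n with a single
--     accumulator in Z[x]/(x^2 = c) instead of the base-square/accumulator pair.'''
--     if n==2 or n==3: return True;
--     if n<2 or n%2==0 or n%3==0: return False;
--
--     # perfect-square check (Newton), unchanged
--     x = 1<<((n.bit_length()+1)//2)
--     while True:
--         delta = x*x-n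
--         if delta==0: return False
--         if delta< 0: break
--         x -= 1+delta//(2*x)
--
--     # c selection, unchanged
--     c = 0
--     if   n%4 == 3    : c=-1
--     elif n%8 == 5    : c=2
--     elif n%24==17    : c=3
--     else:
--         c = 5
--         while True:
--             jcn = Jacobi(c,n)
--             if jcn== 0: return False;
--             if jcn==-1: break;
--             c =c+2
--
--     a = 1; b=1;
--     if c<3: a=2;
--
--     # left-to-right square-and-multiply of (a + b*x)^n mod (n, x^2 - c)
--     ra = 1; rb = 0
--     for i in range(n.bit_length()-1, -1, -1):
--         ta = (ra*ra + c*rb*rb) % n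
--         rb = (2*ra*rb) % n
--         ra = ta
--         if (n >> i) & 1:
--             ta = (ra*a + rb*b*c) % n
--             rb = (ra*b + rb*a) % n
--             ra = ta
--     return (ra==a) and (rb==n-b)
-- ===== Notes on version B (the rewrite author's own statement) =====
-- stated objective: alternative
-- what changed: The final ring exponentiation (a+b*x)^n in Z[x]/(n, x^2-c) is computed left-to-right over the bits of n with a single accumulator (square, then conditionally multiply by the fixed base) instead of the original right-to-left loop that maintains both a running base-square pair and a result pair; guards, the Newton perfect-square check and the c-selection are unchanged.
import Mathlib
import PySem

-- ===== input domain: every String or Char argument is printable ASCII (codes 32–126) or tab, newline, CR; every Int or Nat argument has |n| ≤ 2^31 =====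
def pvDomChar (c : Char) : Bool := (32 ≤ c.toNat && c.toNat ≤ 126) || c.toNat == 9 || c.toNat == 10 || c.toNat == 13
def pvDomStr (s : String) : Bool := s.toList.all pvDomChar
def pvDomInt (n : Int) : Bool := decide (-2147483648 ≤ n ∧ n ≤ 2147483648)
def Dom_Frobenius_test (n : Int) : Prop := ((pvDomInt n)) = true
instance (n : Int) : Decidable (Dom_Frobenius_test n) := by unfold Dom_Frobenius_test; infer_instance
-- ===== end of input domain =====

-- B changes only the final exponentiation: one left-to-right accumulator over the bits of n
-- instead of A's right-to-left result/base-square pair; guards, Newton square check and the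
-- c-selection are identical code in both sources and are therefore shared helpers here.

-- ===== PORT A =====
-- shared helper: the module's Jacobi symbol (identical source in Source A and Source B).
-- The while-loops are ported with a fuel bound; each loop step strictly decreases
-- |a|+|b|, so fuel a.natAbs+b.natAbs+2 is never exhausted (fuel-out value 0 is unreachable).
def jacobiLoop (b : Int) : Nat → Int → Int → Int → Int
  | 0, _, _, _ => 0
  | fuel+1, a, bb, res =>
    if a = 0 then 0
    else if PySem.Int.mod a 4 = 0 then jacobiLoop b fuel (PySem.Int.floordiv a 4) bb res
    else if PySem.Int.mod a 4 = 2 then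
      let res := if PySem.Int.mod bb 8 = 3 ∨ PySem.Int.mod bb 8 = 5 then -res else res
      jacobiLoop b fuel (PySem.Int.floordiv a 2) bb res
    else if a = 1 then res
    else
      let res := if PySem.Int.mod a 4 = 3 ∧ PySem.Int.mod bb 4 = 3 then -res else res
      jacobiLoop b fuel (PySem.Int.mod bb a) a res

def pyJacobi (a b : Int) : Int :=
  if b ≤ 1 ∨ PySem.Int.mod b 2 = 0 then 0
  else
    let res : Int := if a < 0 ∧ PySem.Int.mod b 4 = 3 then -1 else 1
    let a := if a < 0 then -a else a
    let a := if a ≥ b then PySem.Int.mod a b else a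
    jacobiLoop b (a.natAbs + b.natAbs + 2) a b res

-- shared helper: A's Newton-iteration perfect-square check (identical source in Source B).
-- x strictly decreases while delta > 0 and stays ≥ 1, so fuel n.toNat+2 is never exhausted
-- for the n ≥ 5 on which it is called (fuel-out value false is unreachable).
def sqrtLoop (n : Int) : Nat → Int → Bool
  | 0, _ => false
  | fuel+1, x =>
    let delta := x * x - n
    if delta = 0 then true
    else if delta < 0 then false
    else sqrtLoop n fuel (x - (1 + PySem.Int.floordiv delta (2 * x)))

def isSquare' (n : Int) : Bool :=
  sqrtLoop n (n.toNat + 2) (2 ^ ((PySem.Int.bitLength n + 1) / 2))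

-- shared helper: A's c-selection (identical source in Source B); none = "return False".
-- c walks the odd numbers ≥ 5 and reaches a prime factor of n (all ≥ 5 here) within
-- n.toNat+2 steps, where Jacobi = 0 stops the loop, so fuel is never exhausted.
def findCLoop (n : Int) : Nat → Int → Option Int
  | 0, _ => none
  | fuel+1, c =>
    let jcn := pyJacobi c n
    if jcn = 0 then none
    else if jcn = -1 then some c
    else findCLoop n fuel (c + 2)

def frobC (n : Int) : Option Int :=
  if PySem.Int.mod n 4 = 3 then some (-1)
  else if PySem.Int.mod n 8 = 5 then some 2
  else if PySem.Int.mod n 24 = 17 then some 3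
  else findCLoop n (n.toNat + 2) 5

-- A's right-to-left square-and-multiply: result pair (a1,b1), base-square pair (a2,b2).
def loopA (n c : Int) (a1 b1 a2 b2 k : Int) : Int × Int :=
  if h : k ≤ 0 then (a1, b1)
  else
    let a1' := if PySem.Int.mod k 2 = 1 then PySem.Int.mod (a1 * a2 + b1 * b2 * c) n else a1
    let b1' := if PySem.Int.mod k 2 = 1 then PySem.Int.mod (a1 * b2 + a2 * b1) n else b1
    let ta := PySem.Int.mod (a2 * a2 + c * b2 * b2) n
    let b2' := PySem.Int.mod (2 * a2 * b2) n
    loopA n c a1' b1' ta b2' (PySem.Int.floordiv k 2)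
termination_by k.toNat
decreasing_by
  have h2 : PySem.Int.floordiv k 2 = k / 2 := PySem.Int.floordiv_eq_ediv_of_pos (by norm_num)
  rw [h2]; omega

def Frobenius_test (n : Int) : Bool :=
  if n < 2 then false
  else if n = 2 ∨ n = 3 then true
  else if PySem.Int.mod n 2 = 0 ∨ PySem.Int.mod n 3 = 0 then false
  else if isSquare' n then false
  else
    match frobC n with
    | none => false
    | some c =>
      let a : Int := if c < 3 then 2 else 1
      let b : Int := 1
      let r := loopA n c 1 0 a b n
      decide (r.1 = a) && decide (r.2 = n - b)

-- ===== PORT B =====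
-- B's left-to-right square-and-multiply: a single accumulator (ra,rb), scanning the
-- bits of n from bit (fuel-1) down to bit 0; (n >> i) & 1 is floordiv n 2^i mod 2.
def loopB (n c a b : Int) : Int → Int → Nat → Int × Int
  | ra, rb, 0 => (ra, rb)
  | ra, rb, j+1 =>
    let ta := PySem.Int.mod (ra * ra + c * rb * rb) n
    let rb' := PySem.Int.mod (2 * ra * rb) n
    let ra' := ta
    if PySem.Int.mod (PySem.Int.floordiv n (2 ^ j)) 2 = 1 then
      loopB n c a b (PySem.Int.mod (ra' * a + rb' * b * c) n)
                    (PySem.Int.mod (ra' * b + rb' * a) n) j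
    else loopB n c a b ra' rb' j

def Frobenius_test_alt (n : Int) : Bool :=
  if n = 2 ∨ n = 3 then true
  else if n < 2 ∨ PySem.Int.mod n 2 = 0 ∨ PySem.Int.mod n 3 = 0 then false
  else if isSquare' n then false
  else
    match frobC n with
    | none => false
    | some c =>
      let a : Int := if c < 3 then 2 else 1
      let b : Int := 1
      let r := loopB n c a b 1 0 (PySem.Int.bitLength n)
      decide (r.1 = a) && decide (r.2 = n - b)

-- ===== PRECONDITION & SPEC =====
def Spec_Frobenius_test (n : Int) (out : Bool) : Prop := out = Frobenius_test_alt n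
instance (n : Int) (out : Bool) : Decidable (Spec_Frobenius_test n out) := by unfold Spec_Frobenius_test; infer_instance

-- ===== CLAIM (what is proved, stated in full; the proofs are below) =====
def Claim_equal_Frobenius_test : Prop := ∀ (n : Int), Dom_Frobenius_test n → Spec_Frobenius_test n (Frobenius_test n)

-- ===== LEMMAS AND PROOFS =====

-- Abstract model: Z[x]/(x^2 = c) over ZMod m, as pairs (a,b) = a + b*x.
def mulR (m : Nat) (c : ZMod m) (p q : ZMod m × ZMod m) : ZMod m × ZMod m :=
  (p.1 * q.1 + p.2 * q.2 * c, p.1 * q.2 + p.2 * q.1)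

def powR (m : Nat) (c : ZMod m) (s : ZMod m × ZMod m) : Nat → ZMod m × ZMod m
  | 0 => (1, 0)
  | k+1 => mulR m c s (powR m c s k)

-- abstract form of A's loop (exponent as a Nat)
def gA (m : Nat) (c : ZMod m) : Nat → ZMod m × ZMod m → ZMod m × ZMod m → ZMod m × ZMod m
  | 0, r, _ => r
  | k+1, r, s =>
    gA m c ((k+1)/2) (if (k+1) % 2 = 1 then mulR m c r s else r) (mulR m c s s)
decreasing_by omega

-- abstract form of B's loop (exponent k : Nat, base s)
def gB (m : Nat) (c : ZMod m) (k : Nat) (s : ZMod m × ZMod m) :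
    Nat → ZMod m × ZMod m → ZMod m × ZMod m
  | 0, r => r
  | j+1, r =>
    let r2 := mulR m c r r
    gB m c k s j (if k / 2 ^ j % 2 = 1 then mulR m c r2 s else r2)

theorem mulR_comm (m : Nat) (c : ZMod m) (p q : ZMod m × ZMod m) :
    mulR m c p q = mulR m c q p := by
  simp only [mulR, Prod.mk.injEq]; constructor <;> ring

theorem mulR_assoc (m : Nat) (c : ZMod m) (p q r : ZMod m × ZMod m) :
    mulR m c (mulR m c p q) r = mulR m c p (mulR m c q r) := by
  simp only [mulR, Prod.mk.injEq]; constructor <;> ring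

theorem mulR_left_comm (m : Nat) (c : ZMod m) (p q r : ZMod m × ZMod m) :
    mulR m c p (mulR m c q r) = mulR m c q (mulR m c p r) := by
  rw [← mulR_assoc, mulR_comm m c p q, mulR_assoc]

theorem mulR_one (m : Nat) (c : ZMod m) (p : ZMod m × ZMod m) :
    mulR m c p (1, 0) = p := by
  simp only [mulR]; cases p; simp

theorem one_mulR (m : Nat) (c : ZMod m) (p : ZMod m × ZMod m) :
    mulR m c (1, 0) p = p := by
  rw [mulR_comm]; exact mulR_one m c p

theorem powR_add (m : Nat) (c : ZMod m) (s : ZMod m × ZMod m) (i j : Nat) :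
    powR m c s (i + j) = mulR m c (powR m c s i) (powR m c s j) := by
  induction i with
  | zero => simp [powR, one_mulR]
  | succ i ih =>
    have : i + 1 + j = (i + j) + 1 := by omega
    rw [this, powR, powR, ih, ← mulR_assoc]

theorem mulR_powR (m : Nat) (c : ZMod m) (x y : ZMod m × ZMod m) (j : Nat) :
    powR m c (mulR m c x y) j = mulR m c (powR m c x j) (powR m c y j) := by
  induction j with
  | zero => simp [powR, one_mulR]
  | succ j ih =>
    rw [powR, powR, powR, ih]
    rw [mulR_assoc, mulR_left_comm m c y, ← mulR_assoc]

theorem powR_two_mul (m : Nat) (c : ZMod m) (s : ZMod m × ZMod m) (j : Nat) :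
    powR m c s (2 * j) = powR m c (mulR m c s s) j := by
  induction j with
  | zero => simp [powR]
  | succ j ih =>
    have : 2 * (j + 1) = (2 * j) + 1 + 1 := by omega
    rw [this, powR, powR, ih, powR, ← mulR_assoc]

theorem powR_one_pair (m : Nat) (c : ZMod m) (j : Nat) :
    powR m c (1, 0) j = (1, 0) := by
  induction j with
  | zero => rfl
  | succ j ih => rw [powR, ih, one_mulR]

theorem gA_eq (m : Nat) (c : ZMod m) :
    ∀ k r s, gA m c k r s = mulR m c r (powR m c s k) := by
  intro k
  induction k using Nat.strong_induction_on with
  | _ k ih =>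
    intro r s
    match k with
    | 0 => rw [gA, powR, mulR_one]
    | k+1 =>
      rw [gA, ih ((k+1)/2) (by omega)]
      by_cases hp : (k+1) % 2 = 1
      · rw [if_pos hp, ← powR_two_mul, mulR_assoc]
        have hs : mulR m c s (powR m c s (2 * ((k+1)/2))) = powR m c s (2 * ((k+1)/2) + 1) := by
          rw [powR]
        rw [hs]
        have h1 : 2 * ((k+1)/2) + 1 = k + 1 := by omega
        rw [h1]
      · rw [if_neg hp, ← powR_two_mul]
        have h1 : 2 * ((k+1)/2) = k + 1 := by omega
        rw [h1]

theorem gB_eq (m : Nat) (c : ZMod m) (k : Nat) (s : ZMod m × ZMod m) :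
    ∀ j r, gB m c k s j r = mulR m c (powR m c r (2 ^ j)) (powR m c s (k % 2 ^ j)) := by
  intro j
  induction j with
  | zero => intro r; rw [gB]; simp [powR, Nat.mod_one, mulR_one]
  | succ j ih =>
    intro r
    rw [gB, ih]
    have hsplit : k % 2 ^ (j + 1) = (k / 2 ^ j % 2) * 2 ^ j + k % 2 ^ j := by
      have h1 : (2:Nat) ^ (j+1) = 2 ^ j * 2 := by ring
      rw [h1, Nat.mod_mul]
      ring
    by_cases hb : k / 2 ^ j % 2 = 1
    · rw [if_pos hb, mulR_powR, hsplit, hb]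
      rw [powR_add, ← powR_two_mul]
      have h2 : (2:Nat) ^ (j+1) = 2 * 2 ^ j := by ring
      rw [h2, one_mul, mulR_assoc]
    · rw [if_neg hb]
      have hb0 : k / 2 ^ j % 2 = 0 := by omega
      rw [hsplit, hb0, Nat.zero_mul, Nat.zero_add, ← powR_two_mul]
      have h2 : (2:Nat) ^ (j+1) = 2 * 2 ^ j := by ring
      rw [h2]

-- ((x % n : Int) : ZMod n.toNat) = x, for 0 < n
theorem mod_cast_zmod (n : Int) (hn : 0 < n) (x : Int) :
    ((PySem.Int.mod x n : Int) : ZMod n.toNat) = (x : ZMod n.toNat) := by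
  rw [PySem.Int.mod_eq_emod_of_pos hn, Int.emod_def]
  have hn' : ((n.toNat : Nat) : Int) = n := Int.toNat_of_nonneg hn.le
  have hz : ((n : Int) : ZMod n.toNat) = 0 := by
    rw [← hn']; exact_mod_cast ZMod.natCast_self n.toNat
  push_cast
  rw [hz]; ring

-- commute A's concrete loop into the abstract one
theorem loopA_zmod (n c : Int) (hn : 0 < n) :
    ∀ (j : Nat) (a1 b1 a2 b2 : Int),
      (((loopA n c a1 b1 a2 b2 (j : Int)).1 : ZMod n.toNat),
       ((loopA n c a1 b1 a2 b2 (j : Int)).2 : ZMod n.toNat)) =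
      gA n.toNat (c : ZMod n.toNat) j
        ((a1 : ZMod n.toNat), (b1 : ZMod n.toNat))
        ((a2 : ZMod n.toNat), (b2 : ZMod n.toNat)) := by
  intro j
  induction j using Nat.strong_induction_on with
  | _ j ih =>
    intro a1 b1 a2 b2
    match j with
    | 0 => rw [loopA, gA]; norm_num
    | j+1 =>
      rw [loopA, gA]
      have hle : ¬ ((((j:Nat)+1 : Nat) : Int) ≤ 0) := by push_cast; omega
      rw [dif_neg hle]
      have hmod : PySem.Int.mod (((j+1 : Nat)) : Int) 2 = (((j+1) % 2 : Nat) : Int) := by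
        exact_mod_cast PySem.Int.mod_natCast (j+1) 2
      have hdiv : PySem.Int.floordiv (((j+1 : Nat)) : Int) 2 = (((j+1) / 2 : Nat) : Int) := by
        exact_mod_cast PySem.Int.floordiv_natCast (j+1) 2
      have hcond : (PySem.Int.mod (((j+1 : Nat)) : Int) 2 = 1) ↔ ((j+1) % 2 = 1) := by
        rw [hmod]; omega
      rw [hdiv]
      by_cases hp : (j+1) % 2 = 1
      · simp only [if_pos (hcond.mpr hp), if_pos hp]
        rw [ih ((j+1)/2) (by omega)]
        congr 1 <;>
        · simp only [mulR, Prod.mk.injEq, mod_cast_zmod n hn]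
          refine ⟨?_, ?_⟩ <;> (push_cast [mod_cast_zmod n hn]; ring)
      · simp only [if_neg (fun h => hp (hcond.mp h)), if_neg hp]
        rw [ih ((j+1)/2) (by omega)]
        congr 1 <;>
        · simp only [mulR, Prod.mk.injEq, mod_cast_zmod n hn]
          refine ⟨?_, ?_⟩ <;> (push_cast [mod_cast_zmod n hn]; ring)

-- commute B's concrete loop into the abstract one
theorem loopB_zmod (n c a b : Int) (hn : 0 < n) :
    ∀ (j : Nat) (ra rb : Int),
      (((loopB n c a b ra rb j).1 : ZMod n.toNat),
       ((loopB n c a b ra rb j).2 : ZMod n.toNat)) =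
      gB n.toNat (c : ZMod n.toNat) n.toNat
        ((a : ZMod n.toNat), (b : ZMod n.toNat)) j
        ((ra : ZMod n.toNat), (rb : ZMod n.toNat)) := by
  intro j
  induction j with
  | zero => intro ra rb; rw [loopB, gB]
  | succ j ih =>
    intro ra rb
    rw [loopB, gB]
    have hn' : ((n.toNat : Nat) : Int) = n := Int.toNat_of_nonneg hn.le
    have hpow : ((2:Int) ^ j) = (((2 ^ j : Nat)) : Int) := by push_cast; ring
    have hdiv : PySem.Int.floordiv n ((2:Int) ^ j) = ((n.toNat / 2 ^ j : Nat) : Int) := by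
      rw [← hn', hpow]; exact_mod_cast PySem.Int.floordiv_natCast n.toNat (2 ^ j)
    have hmod : PySem.Int.mod (((n.toNat / 2 ^ j : Nat)) : Int) 2
        = ((n.toNat / 2 ^ j % 2 : Nat) : Int) := by
      exact_mod_cast PySem.Int.mod_natCast (n.toNat / 2 ^ j) 2
    have hcond : (PySem.Int.mod (PySem.Int.floordiv n ((2:Int) ^ j)) 2 = 1)
        ↔ (n.toNat / 2 ^ j % 2 = 1) := by
      rw [hdiv, hmod]; omega
    by_cases hb : n.toNat / 2 ^ j % 2 = 1
    · rw [if_pos (hcond.mpr hb), if_pos hb, ih]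
      congr 1 <;>
      · simp only [mulR, Prod.mk.injEq, mod_cast_zmod n hn]
        refine ⟨?_, ?_⟩ <;> (push_cast [mod_cast_zmod n hn]; ring)
    · rw [if_neg (fun h => hb (hcond.mp h)), if_neg hb, ih]
      congr 1 <;>
      · simp only [mulR, Prod.mk.injEq, mod_cast_zmod n hn]
        refine ⟨?_, ?_⟩ <;> (push_cast [mod_cast_zmod n hn]; ring)

-- both loops keep the result components in [0, n)
theorem loopA_range (n c : Int) (hn : 0 < n) :
    ∀ (j : Nat) (a1 b1 a2 b2 : Int), 0 ≤ a1 → a1 < n → 0 ≤ b1 → b1 < n →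
      (0 ≤ (loopA n c a1 b1 a2 b2 (j : Int)).1 ∧ (loopA n c a1 b1 a2 b2 (j : Int)).1 < n ∧
       0 ≤ (loopA n c a1 b1 a2 b2 (j : Int)).2 ∧ (loopA n c a1 b1 a2 b2 (j : Int)).2 < n) := by
  intro j
  induction j using Nat.strong_induction_on with
  | _ j ih =>
    intro a1 b1 a2 b2 h1 h2 h3 h4
    match j with
    | 0 => rw [loopA]; norm_num; exact ⟨h1, h2, h3, h4⟩
    | j+1 =>
      rw [loopA]
      have hle : ¬ ((((j:Nat)+1 : Nat) : Int) ≤ 0) := by push_cast; omega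
      rw [dif_neg hle]
      have hdiv : PySem.Int.floordiv (((j+1 : Nat)) : Int) 2 = (((j+1) / 2 : Nat) : Int) := by
        exact_mod_cast PySem.Int.floordiv_natCast (j+1) 2
      rw [hdiv]
      by_cases hp : PySem.Int.mod (((j+1 : Nat)) : Int) 2 = 1
      · simp only [if_pos hp]
        exact ih ((j+1)/2) (by omega) _ _ _ _
          (PySem.Int.mod_nonneg _ hn) (PySem.Int.mod_lt _ hn)
          (PySem.Int.mod_nonneg _ hn) (PySem.Int.mod_lt _ hn)
      · simp only [if_neg hp]
        exact ih ((j+1)/2) (by omega) _ _ _ _ h1 h2 h3 h4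

theorem loopB_range (n c a b : Int) (hn : 0 < n) :
    ∀ (j : Nat) (ra rb : Int), 0 ≤ ra → ra < n → 0 ≤ rb → rb < n →
      (0 ≤ (loopB n c a b ra rb j).1 ∧ (loopB n c a b ra rb j).1 < n ∧
       0 ≤ (loopB n c a b ra rb j).2 ∧ (loopB n c a b ra rb j).2 < n) := by
  intro j
  induction j with
  | zero => intro ra rb h1 h2 h3 h4; rw [loopB]; exact ⟨h1, h2, h3, h4⟩
  | succ j ih =>
    intro ra rb h1 h2 h3 h4
    rw [loopB]
    by_cases hb : PySem.Int.mod (PySem.Int.floordiv n ((2:Int) ^ j)) 2 = 1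
    · simp only [if_pos hb]
      exact ih _ _ (PySem.Int.mod_nonneg _ hn) (PySem.Int.mod_lt _ hn)
        (PySem.Int.mod_nonneg _ hn) (PySem.Int.mod_lt _ hn)
    · simp only [if_neg hb]
      exact ih _ _ (PySem.Int.mod_nonneg _ hn) (PySem.Int.mod_lt _ hn)
        (PySem.Int.mod_nonneg _ hn) (PySem.Int.mod_lt _ hn)

theorem int_eq_of_zmod (n : Int) (hn : 0 < n) (x y : Int)
    (hx1 : 0 ≤ x) (hx2 : x < n) (hy1 : 0 ≤ y) (hy2 : y < n)
    (h : (x : ZMod n.toNat) = (y : ZMod n.toNat)) : x = y := by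
  have hn' : ((n.toNat : Nat) : Int) = n := Int.toNat_of_nonneg hn.le
  have hme : x ≡ y [ZMOD n.toNat] := (ZMod.intCast_eq_intCast_iff x y n.toNat).mp h
  have : x % ((n.toNat : Nat) : Int) = y % ((n.toNat : Nat) : Int) := hme
  rw [hn', Int.emod_eq_of_lt hx1 hx2, Int.emod_eq_of_lt hy1 hy2] at this
  exact this

-- the two exponentiation loops agree for any c, a, b, for n ≥ 2
theorem tail_eq (n c a b : Int) (hn : 2 ≤ n) :
    loopA n c 1 0 a b n = loopB n c a b 1 0 (PySem.Int.bitLength n) := by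
  have hn0 : (0:Int) < n := by omega
  have hn' : ((n.toNat : Nat) : Int) = n := Int.toNat_of_nonneg hn0.le
  have hklt : n.toNat < 2 ^ PySem.Int.bitLength n := by
    have := PySem.Int.lt_two_pow_bitLength n
    omega
  -- A side in ZMod
  have hA := loopA_zmod n c hn0 n.toNat 1 0 a b
  rw [hn'] at hA
  rw [gA_eq] at hA
  -- B side in ZMod
  have hB := loopB_zmod n c a b hn0 (PySem.Int.bitLength n) 1 0
  rw [gB_eq] at hB
  have hmodk : n.toNat % 2 ^ PySem.Int.bitLength n = n.toNat := Nat.mod_eq_of_lt hklt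
  rw [hmodk] at hB
  simp only [Int.cast_one, Int.cast_zero] at hA hB
  rw [one_mulR] at hA
  rw [powR_one_pair, one_mulR] at hB
  -- so both project to the same pair in ZMod × ZMod
  have hgoal : (((loopA n c 1 0 a b n).1 : ZMod n.toNat), ((loopA n c 1 0 a b n).2 : ZMod n.toNat))
      = (((loopB n c a b 1 0 (PySem.Int.bitLength n)).1 : ZMod n.toNat),
         ((loopB n c a b 1 0 (PySem.Int.bitLength n)).2 : ZMod n.toNat)) := by
    rw [hA, hB]
  have hra := loopA_range n c hn0 n.toNat 1 0 a b (by norm_num) (by omega) (by norm_num) (by omega)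
  rw [hn'] at hra
  have hrb := loopB_range n c a b hn0 (PySem.Int.bitLength n) 1 0
    (by norm_num) (by omega) (by norm_num) (by omega)
  have h1 := congrArg Prod.fst hgoal
  have h2 := congrArg Prod.snd hgoal
  simp only at h1 h2
  have e1 := int_eq_of_zmod n hn0 _ _ hra.1 hra.2.1 hrb.1 hrb.2.1 h1
  have e2 := int_eq_of_zmod n hn0 _ _ hra.2.2.1 hra.2.2.2 hrb.2.2.1 hrb.2.2.2 h2
  exact Prod.ext e1 e2

-- ===== VERDICT (by name: the statement is the Claim_ definition above) =====
theorem Frobenius_test_spec : Claim_equal_Frobenius_test := by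
  intro n _
  unfold Spec_Frobenius_test Frobenius_test Frobenius_test_alt
  by_cases h23 : n = 2 ∨ n = 3
  · rcases h23 with rfl | rfl <;> decide
  · by_cases hlt : n < 2
    · simp only [if_pos hlt, if_neg h23,
        if_pos (show n < 2 ∨ PySem.Int.mod n 2 = 0 ∨ PySem.Int.mod n 3 = 0 from Or.inl hlt)]
    · by_cases h2 : PySem.Int.mod n 2 = 0
      · simp only [if_neg hlt, if_neg h23,
          if_pos (show PySem.Int.mod n 2 = 0 ∨ PySem.Int.mod n 3 = 0 from Or.inl h2),
          if_pos (show n < 2 ∨ PySem.Int.mod n 2 = 0 ∨ PySem.Int.mod n 3 = 0 from Or.inr (Or.inl h2))]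
      · by_cases h3 : PySem.Int.mod n 3 = 0
        · simp only [if_neg hlt, if_neg h23,
            if_pos (show PySem.Int.mod n 2 = 0 ∨ PySem.Int.mod n 3 = 0 from Or.inr h3),
            if_pos (show n < 2 ∨ PySem.Int.mod n 2 = 0 ∨ PySem.Int.mod n 3 = 0 from Or.inr (Or.inr h3))]
        · have hno : ¬ (n < 2 ∨ PySem.Int.mod n 2 = 0 ∨ PySem.Int.mod n 3 = 0) := by
            intro h; rcases h with h | h | h <;> [exact hlt h; exact h2 h; exact h3 h]
          have hcond : ¬ (PySem.Int.mod n 2 = 0 ∨ PySem.Int.mod n 3 = 0) := by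
            intro h; rcases h with h | h <;> [exact h2 h; exact h3 h]
          simp only [if_neg hlt, if_neg h23, if_neg hcond, if_neg hno]
          cases hs : isSquare' n
          · simp only [Bool.false_eq_true, if_false]
            cases hc : frobC n with
            | none => rfl
            | some c =>
              simp only
              rw [tail_eq n c (if c < 3 then 2 else 1) 1 (by omega)]
          · simp
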